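-- pv_equiv track=rewrite | github.com/VasanthVanan/leet-code-challenges | easy/strings/2103.py | function
-- ===== SOURCE A (Python) =====
-- def function(s):
--     hashmap, result = {}, 0
--     # iterate every pair incrementing by 2
--     for i in range(0,len(s), 2):
--         # add the pair to the hashmap if it doesn't exist
--         if s[i+1] not in hashmap:
--             hashmap[s[i+1]] = s[i]
--         # if the pair exists, append the new letter to the existing pair
--         else:
--             hashmap[s[i+1]] = hashmap[s[i+1]] + s[i]
--
--     # iterate through the hashmap and check if 'B', 'G', 'R' is present in the hashmap
--     for key in hashmap:
--         if all(x in hashmap[key] for x in 'BGR'):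
--             # increment the result
--             result += 1
--
--     return result
-- ===== SOURCE B (Python) =====
-- def function(s):
--     setB, setG, setR = set(), set(), set()
--     # one pass: index each key (second char of the pair) by the colour that hits it
--     for i in range(0, len(s), 2):
--         c = s[i]
--         k = s[i + 1]
--         if c == 'B':
--             setB.add(k)
--         elif c == 'G':
--             setG.add(k)
--         elif c == 'R':
--             setR.add(k)
--     return len(setB & setG & setR)
-- ===== Notes on version B (the rewrite author's own statement) =====
-- stated objective: alternative
-- what changed: Instead of grouping all first chars per key in a dict and then scanning each group for B, G and R, B keeps three sets of keys hit by 'B'/'G'/'R' in one pass and returns the size of their intersection.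
import Mathlib
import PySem

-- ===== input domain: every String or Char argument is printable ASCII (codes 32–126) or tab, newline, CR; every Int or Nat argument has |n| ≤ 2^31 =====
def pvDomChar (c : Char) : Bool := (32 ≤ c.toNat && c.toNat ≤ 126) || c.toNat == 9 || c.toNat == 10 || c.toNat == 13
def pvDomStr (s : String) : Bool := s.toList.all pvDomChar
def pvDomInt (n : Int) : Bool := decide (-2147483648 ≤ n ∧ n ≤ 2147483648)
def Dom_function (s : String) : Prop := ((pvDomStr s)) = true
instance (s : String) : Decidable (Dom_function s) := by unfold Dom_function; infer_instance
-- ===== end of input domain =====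

-- B replaces A's dict of per-key letter groups (scanned per key for 'B','G','R') by three
-- colour-indexed key sets filled in one pass and intersected at the end (objective: alternative).

-- ===== PORT A =====
-- literal port of A: group first chars by second char in a dict, then count keys whose
-- group contains all of 'B','G','R'.  s[i+1] on an odd-length s raises IndexError in
-- Python (excluded by Pre_), so pyGetD's default is never read on admitted inputs.
def function (s : String) : Int :=
  let cs := s.toList
  let hm := (PySem.List.pyRange 0 (cs.length : Int) 2).foldl
    (fun (hm : PySem.Dict Char (List Char)) i =>
      if hm.contains (PySem.List.pyGetD cs (i + 1) ' ') = false then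
        hm.insert (PySem.List.pyGetD cs (i + 1) ' ') [PySem.List.pyGetD cs i ' ']
      else
        -- the key is present here, so getD returns exactly hashmap[s[i+1]]
        hm.insert (PySem.List.pyGetD cs (i + 1) ' ')
          (hm.getD (PySem.List.pyGetD cs (i + 1) ' ') [] ++ [PySem.List.pyGetD cs i ' ']))
    PySem.Dict.empty
  hm.items.foldl
    (fun r kv => if ['B', 'G', 'R'].all (fun x => kv.2.contains x) then r + 1 else r) 0

-- ===== PORT B =====
-- literal port of Source B: three colour-indexed key sets, then the intersection's size.
def function_alt (s : String) : Int :=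
  let cs := s.toList
  let st := (PySem.List.pyRange 0 (cs.length : Int) 2).foldl
    (fun (st : PySem.Set Char × PySem.Set Char × PySem.Set Char) i =>
      if PySem.List.pyGetD cs i ' ' = 'B' then
        (PySem.Set.add st.1 (PySem.List.pyGetD cs (i + 1) ' '), st.2.1, st.2.2)
      else if PySem.List.pyGetD cs i ' ' = 'G' then
        (st.1, PySem.Set.add st.2.1 (PySem.List.pyGetD cs (i + 1) ' '), st.2.2)
      else if PySem.List.pyGetD cs i ' ' = 'R' then
        (st.1, st.2.1, PySem.Set.add st.2.2 (PySem.List.pyGetD cs (i + 1) ' '))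
      else st)
    (PySem.Set.empty, PySem.Set.empty, PySem.Set.empty)
  ((PySem.Set.inter (PySem.Set.inter st.1 st.2.1) st.2.2).length : Int)

-- ===== PRECONDITION & SPEC =====
-- Pre_ excludes odd-length strings, on which Python's s[i+1] raises IndexError.
def Pre_function (s : String) : Prop := s.toList.length % 2 = 0
instance (s : String) : Decidable (Pre_function s) := by unfold Pre_function; infer_instance
def pvWitness_function : String := "BXGXRX"

def Spec_function (s : String) (out : Int) : Prop := out = function_alt s
instance (s : String) (out : Int) : Decidable (Spec_function s out) := by unfold Spec_function; infer_instance

-- ===== CLAIM (what is proved, stated in full; the proofs are below) =====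
def Claim_equal_function : Prop := ∀ (s : String), Dom_function s → Pre_function s → Spec_function s (function s)

-- ===== LEMMAS AND PROOFS =====

-- the (key, colour) pairs both loops read: key = s[i+1], colour = s[i]
def pvPairs (cs : List Char) : List (Char × Char) :=
  (PySem.List.pyRange 0 (cs.length : Int) 2).map
    (fun i => (PySem.List.pyGetD cs (i + 1) ' ', PySem.List.pyGetD cs i ' '))

-- A's dict-building loop is a modify-fold over the pairs
lemma A_fold_eq (cs : List Char) :
    ((PySem.List.pyRange 0 (cs.length : Int) 2).foldl
      (fun (hm : PySem.Dict Char (List Char)) i =>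
        if hm.contains (PySem.List.pyGetD cs (i + 1) ' ') = false then
          hm.insert (PySem.List.pyGetD cs (i + 1) ' ') [PySem.List.pyGetD cs i ' ']
        else
          hm.insert (PySem.List.pyGetD cs (i + 1) ' ')
            (hm.getD (PySem.List.pyGetD cs (i + 1) ' ') [] ++ [PySem.List.pyGetD cs i ' ']))
      PySem.Dict.empty)
    = (pvPairs cs).foldl (fun d p => d.modify p.1 [] (· ++ [p.2])) PySem.Dict.empty := by
  rw [pvPairs, List.foldl_map]
  apply PySem.List.foldl_congr_mem
  intro acc i _
  simp [PySem.Dict.modify]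
  intro h
  rw [PySem.Dict.getD_of_not_contains acc (d0 := []) h]
  simp

-- one step of B's loop, componentwise
lemma step_eq (c k : Char) (st : PySem.Set Char × PySem.Set Char × PySem.Set Char) :
    (if c = 'B' then (PySem.Set.add st.1 k, st.2.1, st.2.2)
     else if c = 'G' then (st.1, PySem.Set.add st.2.1 k, st.2.2)
     else if c = 'R' then (st.1, st.2.1, PySem.Set.add st.2.2 k)
     else st)
    = (if c = 'B' then PySem.Set.add st.1 k else st.1,
       if c = 'G' then PySem.Set.add st.2.1 k else st.2.1,
       if c = 'R' then PySem.Set.add st.2.2 k else st.2.2) := by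
  split_ifs with h1 h2 h3 <;> simp_all

-- B's triple-accumulator loop is three independent loops
lemma B_fold_eq (cs : List Char) (l : List Int)
    (st : PySem.Set Char × PySem.Set Char × PySem.Set Char) :
    (l.foldl
      (fun (st : PySem.Set Char × PySem.Set Char × PySem.Set Char) i =>
        if PySem.List.pyGetD cs i ' ' = 'B' then
          (PySem.Set.add st.1 (PySem.List.pyGetD cs (i + 1) ' '), st.2.1, st.2.2)
        else if PySem.List.pyGetD cs i ' ' = 'G' then
          (st.1, PySem.Set.add st.2.1 (PySem.List.pyGetD cs (i + 1) ' '), st.2.2)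
        else if PySem.List.pyGetD cs i ' ' = 'R' then
          (st.1, st.2.1, PySem.Set.add st.2.2 (PySem.List.pyGetD cs (i + 1) ' '))
        else st)
      st)
    = (l.foldl (fun s i => if PySem.List.pyGetD cs i ' ' = 'B' then PySem.Set.add s (PySem.List.pyGetD cs (i + 1) ' ') else s) st.1,
       l.foldl (fun s i => if PySem.List.pyGetD cs i ' ' = 'G' then PySem.Set.add s (PySem.List.pyGetD cs (i + 1) ' ') else s) st.2.1,
       l.foldl (fun s i => if PySem.List.pyGetD cs i ' ' = 'R' then PySem.Set.add s (PySem.List.pyGetD cs (i + 1) ' ') else s) st.2.2) := by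
  induction l generalizing st with
  | nil => rfl
  | cons i t ih =>
    simp only [List.foldl_cons]
    rw [ih, step_eq]

-- one colour component of B is the set of keys hit by that colour
lemma comp_eq (cs : List Char) (col : Char) :
    ((PySem.List.pyRange 0 (cs.length : Int) 2).foldl
      (fun s i => if PySem.List.pyGetD cs i ' ' = col then PySem.Set.add s (PySem.List.pyGetD cs (i + 1) ' ') else s)
      PySem.Set.empty)
    = PySem.Set.ofList (((pvPairs cs).filter (fun p => decide (p.2 = col))).map Prod.fst) := by
  rw [pvPairs, ← List.foldl_map
        (f := fun i => (PySem.List.pyGetD cs (i + 1) ' ', PySem.List.pyGetD cs i ' '))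
        (g := fun (s : PySem.Set Char) (p : Char × Char) => if p.2 = col then PySem.Set.add s p.1 else s),
      PySem.List.foldl_ite_eq_foldl_filter,
      ← PySem.Set.update_map_eq_foldl_add]
  rfl

lemma mem_colSet (P : List (Char × Char)) (c k : Char) :
    (k ∈ PySem.Set.ofList ((P.filter (fun p => decide (p.2 = c))).map Prod.fst)
      ↔ ∃ p ∈ P, p.1 = k ∧ p.2 = c) := by
  rw [PySem.Set.mem_ofList]
  simp only [List.mem_map, List.mem_filter, decide_eq_true_eq]
  constructor
  · rintro ⟨⟨a, b⟩, ⟨hm, hc⟩, rfl⟩; exact ⟨(a, b), hm, rfl, hc⟩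
  · rintro ⟨⟨a, b⟩, hm, rfl, hc⟩; exact ⟨(a, b), ⟨hm, hc⟩, rfl⟩

lemma pred_iff (P : List (Char × Char)) (k : Char) :
    ((['B', 'G', 'R'].all (fun x => ((P.filter (fun p => p.1 == k)).map Prod.snd).contains x)) = true
      ↔ (∃ p ∈ P, p.1 = k ∧ p.2 = 'B') ∧ (∃ p ∈ P, p.1 = k ∧ p.2 = 'G') ∧ (∃ p ∈ P, p.1 = k ∧ p.2 = 'R')) := by
  simp only [List.all_cons, List.all_nil, Bool.and_true, Bool.and_eq_true,
    List.contains_iff_mem, List.mem_map, List.mem_filter, beq_iff_eq]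
  constructor
  · rintro ⟨⟨⟨a1, b1⟩, ⟨h1, e1⟩, f1⟩, ⟨⟨a2, b2⟩, ⟨h2, e2⟩, f2⟩, ⟨⟨a3, b3⟩, ⟨h3, e3⟩, f3⟩⟩
    exact ⟨⟨(a1, b1), h1, e1, f1⟩, ⟨(a2, b2), h2, e2, f2⟩, ⟨(a3, b3), h3, e3, f3⟩⟩
  · rintro ⟨⟨⟨a1, b1⟩, h1, e1, f1⟩, ⟨⟨a2, b2⟩, h2, e2, f2⟩, ⟨⟨a3, b3⟩, h3, e3, f3⟩⟩
    exact ⟨⟨(a1, b1), ⟨h1, e1⟩, f1⟩, ⟨(a2, b2), ⟨h2, e2⟩, f2⟩, ⟨(a3, b3), ⟨h3, e3⟩, f3⟩⟩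

-- the counting identity: keys whose group holds all of B,G,R = the three-way intersection
lemma count_eq_inter_len (P : List (Char × Char)) :
    (PySem.Set.ofList (P.map Prod.fst)).countP
      (fun k => ['B', 'G', 'R'].all (fun x => ((P.filter (fun p => p.1 == k)).map Prod.snd).contains x))
    = (PySem.Set.inter
        (PySem.Set.inter
          (PySem.Set.ofList ((P.filter (fun p => decide (p.2 = 'B'))).map Prod.fst))
          (PySem.Set.ofList ((P.filter (fun p => decide (p.2 = 'G'))).map Prod.fst)))
        (PySem.Set.ofList ((P.filter (fun p => decide (p.2 = 'R'))).map Prod.fst))).length := by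
  have hSB := PySem.Set.nodup_ofList ((P.filter (fun p => decide (p.2 = 'B'))).map Prod.fst)
  have hI : (PySem.Set.inter
        (PySem.Set.inter
          (PySem.Set.ofList ((P.filter (fun p => decide (p.2 = 'B'))).map Prod.fst))
          (PySem.Set.ofList ((P.filter (fun p => decide (p.2 = 'G'))).map Prod.fst)))
        (PySem.Set.ofList ((P.filter (fun p => decide (p.2 = 'R'))).map Prod.fst))).Nodup :=
    PySem.Set.nodup_inter _ _ (PySem.Set.nodup_inter _ _ hSB)
  have hK := PySem.Set.nodup_ofList (P.map Prod.fst)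
  rw [List.countP_eq_length_filter]
  refine List.Perm.length_eq ?_
  rw [List.perm_ext_iff_of_nodup (hK.filter _) hI]
  intro k
  rw [List.mem_filter, PySem.Set.mem_inter, PySem.Set.mem_inter,
      mem_colSet, mem_colSet, mem_colSet, pred_iff, PySem.Set.mem_ofList]
  constructor
  · rintro ⟨_, hB, hG, hR⟩; exact ⟨⟨hB, hG⟩, hR⟩
  · rintro ⟨⟨hB, hG⟩, hR⟩
    refine ⟨?_, hB, hG, hR⟩
    obtain ⟨p, hp, hk, _⟩ := hB
    exact hk ▸ List.mem_map_of_mem hp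

-- A in closed form over the pairs
lemma A_closed (s : String) :
    function s
      = ((PySem.Set.ofList ((pvPairs s.toList).map Prod.fst)).countP
          (fun k => ['B', 'G', 'R'].all
            (fun x => (((pvPairs s.toList).filter (fun p => p.1 == k)).map Prod.snd).contains x)) : Int) := by
  simp only [function]
  rw [A_fold_eq]
  rw [PySem.List.foldl_if_add_one]
  rw [PySem.Dict.items_eq_map_keys _
        (PySem.Dict.nodup_keys_foldl_modify_key (pvPairs s.toList) Prod.fst [] (fun d p => (· ++ [p.2]))
          PySem.Dict.empty PySem.Dict.nodup_keys_empty) []]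
  rw [List.countP_map]
  rw [PySem.Dict.keys_foldl_modify_key]
  rw [PySem.Dict.keys_empty, PySem.Set.update_nil_left]
  simp only [PySem.Dict.getD_foldl_modify_append, PySem.Dict.getD_empty, List.nil_append]
  rw [zero_add]
  rfl

-- B in closed form over the pairs
lemma B_closed (s : String) :
    function_alt s
      = ((PySem.Set.inter
          (PySem.Set.inter
            (PySem.Set.ofList (((pvPairs s.toList).filter (fun p => decide (p.2 = 'B'))).map Prod.fst))
            (PySem.Set.ofList (((pvPairs s.toList).filter (fun p => decide (p.2 = 'G'))).map Prod.fst)))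
          (PySem.Set.ofList (((pvPairs s.toList).filter (fun p => decide (p.2 = 'R'))).map Prod.fst))).length : Int) := by
  simp only [function_alt]
  rw [B_fold_eq]
  rw [comp_eq, comp_eq, comp_eq]

-- ===== VERDICT (by name: the statement is the Claim_ definition above) =====
theorem function_spec : Claim_equal_function := by
  intro s _ _
  unfold Spec_function
  rw [A_closed, B_closed, count_eq_inter_len]
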